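-- pv_equiv track=rewrite | github.com/robhendrik/QSeaBattle | tools/gen_class_docs.py | looks_like_ab_family
-- ===== SOURCE A (Python) =====
-- def looks_like_ab_family(class_names: list[str]) -> bool:
--     # Detect presence of suffix A/B pairs (FooA + FooB), possibly multiple bases.
--     if len(class_names) < 2:
--         return False
--
--     bases = {}
--     for name in class_names:
--         if name.endswith("A") and len(name) > 1:
--             bases.setdefault(name[:-1], set()).add("A")
--         elif name.endswith("B") and len(name) > 1:
--             bases.setdefault(name[:-1], set()).add("B")
--
--     # If at least one base has both A and B, treat as family.
--     return any(v == {"A", "B"} for v in bases.values())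
-- ===== SOURCE B (Python) =====
-- def looks_like_ab_family(class_names: list[str]) -> bool:
--     # Partner lookup: a family exists iff some "...A" name has its "...B" twin present.
--     if len(class_names) < 2:
--         return False
--     present = set(class_names)
--     return any(
--         n.endswith("A") and len(n) > 1 and n[:-1] + "B" in present
--         for n in class_names
--     )
-- ===== Notes on version B (the rewrite author's own statement) =====
-- stated objective: alternative
-- what changed: Instead of grouping names by base into a dict of suffix-sets and scanning for {'A','B'}, B never computes any base grouping: it builds one membership set of the original names and, for each name ending in 'A', directly looks up its synthesized partner name base+'B'.
import Mathlib
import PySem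

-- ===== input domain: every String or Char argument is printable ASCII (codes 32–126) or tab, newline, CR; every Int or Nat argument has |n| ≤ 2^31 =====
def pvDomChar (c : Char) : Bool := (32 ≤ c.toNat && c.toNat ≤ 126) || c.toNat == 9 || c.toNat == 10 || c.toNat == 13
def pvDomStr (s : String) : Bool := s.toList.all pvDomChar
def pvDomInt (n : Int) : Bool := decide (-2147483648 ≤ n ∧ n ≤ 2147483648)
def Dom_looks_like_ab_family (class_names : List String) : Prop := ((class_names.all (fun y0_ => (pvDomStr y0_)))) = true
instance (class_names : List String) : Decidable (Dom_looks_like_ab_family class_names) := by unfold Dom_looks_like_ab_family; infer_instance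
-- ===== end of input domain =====

-- B drops A's dict-of-suffix-sets grouping entirely: it builds one membership set of the names and, for each "...A" name, looks up the synthesized partner name base+"B" (objective: alternative).

-- ===== PORT A =====
-- name[:-1]
def abKey (name : String) : String := PySem.Str.slice name none (some (-1))

-- name.endswith("A") and len(name) > 1  /  name.endswith("B") and len(name) > 1
def abCondA (name : String) : Bool := PySem.Str.endswith name "A" && decide (1 < PySem.Str.len name)
def abCondB (name : String) : Bool := PySem.Str.endswith name "B" && decide (1 < PySem.Str.len name)

-- one iteration of A's loop: bases.setdefault(name[:-1], set()).add(tag)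
def abStep (d : PySem.Dict String (PySem.Set String)) (name : String) :
    PySem.Dict String (PySem.Set String) :=
  if abCondA name then
    d.modify (abKey name) PySem.Set.empty (fun s => PySem.Set.add s "A")
  else if abCondB name then
    d.modify (abKey name) PySem.Set.empty (fun s => PySem.Set.add s "B")
  else d

def looks_like_ab_family (class_names : List String) : Bool :=
  if class_names.length < 2 then false
  else
    ((class_names.foldl abStep PySem.Dict.empty).values.any
      (fun v => PySem.Set.equal v (PySem.Set.ofList ["A", "B"])))

-- ===== PORT B =====
-- n[:-1] + "B"  (Python string concatenation is exact append of the character lists)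
def abPartnerB (n : String) : String :=
  String.ofList ((PySem.Str.slice n none (some (-1))).toList ++ ("B" : String).toList)

def looks_like_ab_family_alt (class_names : List String) : Bool :=
  if class_names.length < 2 then false
  else
    let present : PySem.Set String := PySem.Set.ofList class_names
    class_names.any (fun n =>
      PySem.Str.endswith n "A" && decide (1 < PySem.Str.len n) &&
      PySem.Set.contains present (abPartnerB n))

-- ===== PRECONDITION & SPEC =====
def Spec_looks_like_ab_family (class_names : List String) (out : Bool) : Prop := out = looks_like_ab_family_alt class_names
instance (class_names : List String) (out : Bool) : Decidable (Spec_looks_like_ab_family class_names out) := by unfold Spec_looks_like_ab_family; infer_instance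

-- ===== CLAIM (what is proved, stated in full; the proofs are below) =====
def Claim_equal_looks_like_ab_family : Prop := ∀ (class_names : List String), Dom_looks_like_ab_family class_names → Spec_looks_like_ab_family class_names (looks_like_ab_family class_names)

-- ===== LEMMAS AND PROOFS =====

-- "some name of the list ends in 'A' (resp. 'B'), is longer than 1, and has base k"
def abPA (xs : List String) (k : String) : Prop := ∃ m ∈ xs, abCondA m = true ∧ abKey m = k
def abPB (xs : List String) (k : String) : Prop := ∃ m ∈ xs, abCondB m = true ∧ abKey m = k

-- invariant of A's loop over the processed prefix 'seen'
def abInv (d : PySem.Dict String (PySem.Set String)) (seen : List String) : Prop :=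
  d.keys.Nodup ∧
  (∀ k t, t ∈ d.getD k PySem.Set.empty → t = "A" ∨ t = "B") ∧
  (∀ k, "A" ∈ d.getD k PySem.Set.empty ↔ abPA seen k) ∧
  (∀ k, "B" ∈ d.getD k PySem.Set.empty ↔ abPB seen k)

-- a string cannot end with both "A" and "B"
lemma ab_endswith_excl (n : String) (hA : PySem.Str.endswith n "A" = true) :
    PySem.Str.endswith n "B" = false := by
  by_contra h
  have hB : PySem.Str.endswith n "B" = true := by
    cases hBc : PySem.Str.endswith n "B" with
    | true => rfl
    | false => exact absurd hBc h
  rw [PySem.Str.endswith_eq] at hA hB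
  obtain ⟨t1, e1⟩ := (PySem.Chars.endswith_iff _ _).mp hA
  obtain ⟨t2, e2⟩ := (PySem.Chars.endswith_iff _ _).mp hB
  have tA : ("A" : String).toList = ['A'] := by decide
  have tB : ("B" : String).toList = ['B'] := by decide
  rw [tA] at e1
  rw [tB] at e2
  have g1 : n.toList.getLast? = some 'A' := by rw [← e1]; simp
  have g2 : n.toList.getLast? = some 'B' := by rw [← e2]; simp
  rw [g1] at g2
  simp at g2

lemma abPA_append (xs : List String) (n k : String) :
    abPA (xs ++ [n]) k ↔ abPA xs k ∨ (abCondA n = true ∧ abKey n = k) := by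
  unfold abPA; constructor
  · rintro ⟨m, hm, hc, hk⟩
    rcases List.mem_append.mp hm with h | h
    · exact Or.inl ⟨m, h, hc, hk⟩
    · simp at h; subst h; exact Or.inr ⟨hc, hk⟩
  · rintro (⟨m, hm, hc, hk⟩ | ⟨hc, hk⟩)
    · exact ⟨m, List.mem_append.mpr (Or.inl hm), hc, hk⟩
    · exact ⟨n, List.mem_append.mpr (Or.inr (by simp)), hc, hk⟩

lemma abPB_append (xs : List String) (n k : String) :
    abPB (xs ++ [n]) k ↔ abPB xs k ∨ (abCondB n = true ∧ abKey n = k) := by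
  unfold abPB; constructor
  · rintro ⟨m, hm, hc, hk⟩
    rcases List.mem_append.mp hm with h | h
    · exact Or.inl ⟨m, h, hc, hk⟩
    · simp at h; subst h; exact Or.inr ⟨hc, hk⟩
  · rintro (⟨m, hm, hc, hk⟩ | ⟨hc, hk⟩)
    · exact ⟨m, List.mem_append.mpr (Or.inl hm), hc, hk⟩
    · exact ⟨n, List.mem_append.mpr (Or.inr (by simp)), hc, hk⟩

lemma nodup_keys_modify (d : PySem.Dict String (PySem.Set String)) (k : String)
    (d0 : PySem.Set String) (f : PySem.Set String → PySem.Set String)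
    (h : d.keys.Nodup) : (d.modify k d0 f).keys.Nodup := by
  rw [PySem.Dict.keys_modify]
  by_cases hc : d.contains k = true
  · rw [PySem.Dict.keys_insert_of_contains _ _ hc]; exact h
  · rw [PySem.Dict.keys_insert_of_not_contains _ _ (by simpa using hc)]
    refine List.Nodup.append h (List.nodup_singleton k) ?_
    intro a ha hb
    simp at hb; subst hb
    exact hc ((PySem.Dict.contains_iff_mem_keys _ _).mpr ha)

lemma abInv_step (d : PySem.Dict String (PySem.Set String)) (seen : List String) (n : String)
    (h : abInv d seen) : abInv (abStep d n) (seen ++ [n]) := by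
  obtain ⟨hnd, hsub, hA, hB⟩ := h
  unfold abStep
  by_cases hcA : abCondA n = true
  · have hnB : abCondB n = false := by
      unfold abCondA at hcA
      unfold abCondB
      rw [ab_endswith_excl n ((Bool.and_eq_true _ _).mp hcA).1]
      rfl
    rw [if_pos hcA]
    refine ⟨nodup_keys_modify _ _ _ _ hnd, ?_, ?_, ?_⟩
    · intro k t ht
      simp only [PySem.Dict.getD_modify] at ht
      by_cases hk : k = abKey n
      · rw [if_pos hk, PySem.Set.mem_add] at ht
        rcases ht with h' | h'
        · exact hsub _ _ h'
        · exact Or.inl h'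
      · rw [if_neg hk] at ht; exact hsub _ _ ht
    · intro k
      simp only [PySem.Dict.getD_modify]
      rw [abPA_append]
      by_cases hk : k = abKey n
      · subst hk
        rw [if_pos rfl, PySem.Set.mem_add]
        constructor
        · intro _; simp [hcA]
        · intro _; simp
      · have hk' : abKey n ≠ k := fun h' => hk h'.symm
        rw [if_neg hk, hA k]
        simp [hk']
    · intro k
      simp only [PySem.Dict.getD_modify]
      rw [abPB_append]
      by_cases hk : k = abKey n
      · subst hk
        rw [if_pos rfl, PySem.Set.mem_add, hB (abKey n)]
        simp [hnB]
      · have hk' : abKey n ≠ k := fun h' => hk h'.symm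
        rw [if_neg hk, hB k]
        simp [hnB, hk']
  · rw [if_neg hcA]
    have hcA' : abCondA n = false := by
      cases hc : abCondA n with
      | true => exact absurd hc hcA
      | false => rfl
    by_cases hcB : abCondB n = true
    · rw [if_pos hcB]
      refine ⟨nodup_keys_modify _ _ _ _ hnd, ?_, ?_, ?_⟩
      · intro k t ht
        simp only [PySem.Dict.getD_modify] at ht
        by_cases hk : k = abKey n
        · rw [if_pos hk, PySem.Set.mem_add] at ht
          rcases ht with h' | h'
          · exact hsub _ _ h'
          · exact Or.inr h'
        · rw [if_neg hk] at ht; exact hsub _ _ ht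
      · intro k
        simp only [PySem.Dict.getD_modify]
        rw [abPA_append]
        by_cases hk : k = abKey n
        · subst hk
          rw [if_pos rfl, PySem.Set.mem_add, hA (abKey n)]
          simp [hcA']
        · have hk' : abKey n ≠ k := fun h' => hk h'.symm
          rw [if_neg hk, hA k]
          simp [hcA', hk']
      · intro k
        simp only [PySem.Dict.getD_modify]
        rw [abPB_append]
        by_cases hk : k = abKey n
        · subst hk
          rw [if_pos rfl, PySem.Set.mem_add]
          constructor
          · intro _; simp [hcB]
          · intro _; simp
        · have hk' : abKey n ≠ k := fun h' => hk h'.symm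
          rw [if_neg hk, hB k]
          simp [hk']
    · rw [if_neg hcB]
      have hcB' : abCondB n = false := by
        cases hc : abCondB n with
        | true => exact absurd hc hcB
        | false => rfl
      refine ⟨hnd, hsub, ?_, ?_⟩
      · intro k
        rw [abPA_append, hA k]
        simp [hcA']
      · intro k
        rw [abPB_append, hB k]
        simp [hcB']

lemma abInv_foldl (xs : List String) : ∀ (seen : List String) (d : PySem.Dict String (PySem.Set String)),
    abInv d seen → abInv (xs.foldl abStep d) (seen ++ xs) := by
  induction xs with
  | nil => intro seen d h; simpa using h
  | cons x xs ih =>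
      intro seen d h
      have h' := abInv_step d seen x h
      have := ih (seen ++ [x]) (abStep d x) h'
      simpa [List.append_assoc] using this

lemma abInv_empty : abInv PySem.Dict.empty [] := by
  refine ⟨PySem.Dict.nodup_keys_empty, ?_, ?_, ?_⟩
  · intro k t ht
    rw [PySem.Dict.getD_empty] at ht
    exact absurd ht (by simp [PySem.Set.empty])
  · intro k
    rw [PySem.Dict.getD_empty]
    simp [PySem.Set.empty, abPA]
  · intro k
    rw [PySem.Dict.getD_empty]
    simp [PySem.Set.empty, abPB]

lemma mem_keys_of_mem_getD (d : PySem.Dict String (PySem.Set String)) (k t : String)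
    (h : t ∈ d.getD k PySem.Set.empty) : k ∈ d.keys := by
  by_contra hk
  have := (PySem.Dict.get?_eq_none_iff_not_mem_keys d k).mpr hk
  rw [PySem.Dict.getD_eq_get?_getD, this] at h
  exact absurd h (by simp [PySem.Set.empty])

-- characterization of A's result (list long enough)
lemma A_char (names : List String) (h2 : ¬ names.length < 2) :
    looks_like_ab_family names = true ↔ ∃ k, abPA names k ∧ abPB names k := by
  unfold looks_like_ab_family
  rw [if_neg h2]
  have hinv : abInv (names.foldl abStep PySem.Dict.empty) names := by
    have := abInv_foldl names [] PySem.Dict.empty abInv_empty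
    simpa using this
  obtain ⟨hnd, hsub, hA, hB⟩ := hinv
  set d := names.foldl abStep PySem.Dict.empty with hd
  rw [List.any_eq_true]
  constructor
  · rintro ⟨v, hv, heq⟩
    rw [PySem.Dict.values_eq_map_keys d hnd PySem.Set.empty] at hv
    obtain ⟨k, hk, rfl⟩ := List.mem_map.mp hv
    have he := (PySem.Set.equal_iff _ _).mp heq
    refine ⟨k, (hA k).mp ?_, (hB k).mp ?_⟩
    · exact (he "A").mpr (by rw [PySem.Set.mem_ofList]; simp)
    · exact (he "B").mpr (by rw [PySem.Set.mem_ofList]; simp)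
  · rintro ⟨k, hpa, hpb⟩
    have hmA : "A" ∈ d.getD k PySem.Set.empty := (hA k).mpr hpa
    have hmB : "B" ∈ d.getD k PySem.Set.empty := (hB k).mpr hpb
    refine ⟨d.getD k PySem.Set.empty, ?_, ?_⟩
    · rw [PySem.Dict.values_eq_map_keys d hnd PySem.Set.empty]
      exact List.mem_map.mpr ⟨k, mem_keys_of_mem_getD d k "A" hmA, rfl⟩
    · rw [PySem.Set.equal_iff]
      intro x
      rw [PySem.Set.mem_ofList]
      constructor
      · intro hx
        rcases hsub k x hx with h' | h' <;> simp [h']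
      · intro hx
        simp at hx
        rcases hx with rfl | rfl
        · exact hmA
        · exact hmB

-- the base of a name, on the character-list side
lemma abKey_toList (s : String) : (abKey s).toList = s.toList.dropLast := by
  unfold abKey
  exact PySem.Str.slice_to_neg_one s

-- the partner name, on the character-list side
lemma abPartnerB_toList (n : String) : (abPartnerB n).toList = n.toList.dropLast ++ ['B'] := by
  unfold abPartnerB
  rw [String.toList_ofList, PySem.Str.slice_to_neg_one]
  have tB : ("B" : String).toList = ['B'] := by decide
  rw [tB]

-- the partner of a "...A" name is a "...B" name with the same base
lemma abPartnerB_cond (n : String) (h : abCondA n = true) :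
    abCondB (abPartnerB n) = true ∧ abKey (abPartnerB n) = abKey n := by
  obtain ⟨hend, hlen⟩ := (Bool.and_eq_true _ _).mp h
  have hlen' : 1 < n.toList.length := by
    have := of_decide_eq_true hlen
    rw [PySem.Str.len_eq] at this
    exact_mod_cast this
  have hm : (abPartnerB n).toList = n.toList.dropLast ++ ['B'] := abPartnerB_toList n
  constructor
  · unfold abCondB
    rw [Bool.and_eq_true]
    constructor
    · rw [PySem.Str.endswith_eq]
      apply (PySem.Chars.endswith_iff _ _).mpr
      have tB : ("B" : String).toList = ['B'] := by decide
      rw [hm, tB]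
      exact List.suffix_append _ _
    · apply decide_eq_true
      rw [PySem.Str.len_eq, hm]
      have h1 : (n.toList.dropLast ++ ['B']).length = n.toList.dropLast.length + 1 := by
        simp
      have h2 : n.toList.dropLast.length = n.toList.length - 1 := by
        simp
      rw [h1, h2]
      omega
  · apply String.toList_inj.mp
    rw [abKey_toList, abKey_toList, hm]
    simp
-- a "...B" name is its own base followed by 'B'
lemma abCondB_decomp (m : String) (h : abCondB m = true) :
    m.toList = (abKey m).toList ++ ['B'] := by
  obtain ⟨hend, _⟩ := (Bool.and_eq_true _ _).mp h
  rw [PySem.Str.endswith_eq] at hend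
  obtain ⟨t, ht⟩ := (PySem.Chars.endswith_iff _ _).mp hend
  have tB : ("B" : String).toList = ['B'] := by decide
  rw [tB] at ht
  rw [abKey_toList, ← ht]
  simp

-- characterization of B's result (list long enough)
lemma B_char (names : List String) (h2 : ¬ names.length < 2) :
    looks_like_ab_family_alt names = true ↔ ∃ k, abPA names k ∧ abPB names k := by
  unfold looks_like_ab_family_alt
  rw [if_neg h2]
  simp only [List.any_eq_true]
  constructor
  · rintro ⟨n, hn, hc⟩
    rw [Bool.and_eq_true, Bool.and_eq_true] at hc
    obtain ⟨⟨hend, hlen⟩, hmem⟩ := hc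
    have hcA : abCondA n = true := by
      unfold abCondA; rw [Bool.and_eq_true]; exact ⟨hend, hlen⟩
    have hp : abPartnerB n ∈ names := by
      have := (PySem.Set.contains_iff _ _).mp hmem
      exact (PySem.Set.mem_ofList _ _).mp this
    obtain ⟨hcB, hkeq⟩ := abPartnerB_cond n hcA
    exact ⟨abKey n, ⟨n, hn, hcA, rfl⟩, ⟨abPartnerB n, hp, hcB, hkeq⟩⟩
  · rintro ⟨k, ⟨n, hn, hcA, hkA⟩, ⟨m, hm, hcB, hkB⟩⟩
    refine ⟨n, hn, ?_⟩
    rw [Bool.and_eq_true, Bool.and_eq_true]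
    obtain ⟨hend, hlen⟩ := (Bool.and_eq_true _ _).mp hcA
    refine ⟨⟨hend, hlen⟩, ?_⟩
    have heq : abPartnerB n = m := by
      apply String.toList_inj.mp
      rw [abPartnerB_toList, abCondB_decomp m hcB, ← abKey_toList]
      rw [hkA, hkB]
    rw [heq]
    exact (PySem.Set.contains_iff _ _).mpr ((PySem.Set.mem_ofList _ _).mpr hm)

-- ===== VERDICT (by name: the statement is the Claim_ definition above) =====
theorem looks_like_ab_family_spec : Claim_equal_looks_like_ab_family := by
  intro names _
  unfold Spec_looks_like_ab_family
  by_cases h2 : names.length < 2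
  · unfold looks_like_ab_family looks_like_ab_family_alt
    rw [if_pos h2, if_pos h2]
  · rw [Bool.eq_iff_iff, A_char names h2, B_char names h2]
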